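-- pv_equiv track=rewrite | github.com/vijender883/Answer_Query_flask_app | answer_query.py | _generate_suggested_questions
-- ===== SOURCE A (Python) =====
-- def _generate_suggested_questions(query, response_text=""):
--     """Generate contextual suggested questions based on the query and response, avoiding hallucinations"""
--     query_lower = query.lower()
--
--     # Define conservative question categories that don't assume specific features
--     basic_info_questions = [
--         "What topics are covered in this course?",
--         "What will I learn from this course?",
--         "Tell me more about the course content"
--     ]
--
--     logistics_questions = [
--         "What are the course fees?",
--         "When does the course start?",
--         "How long is the course?"
--     ]
--
--     completion_questions = [
--         "What do I get after completing the course?",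
--         "Are there any certificates provided?",
--         "What are the course outcomes?"
--     ]
--
--     enrollment_questions = [
--         "How can I enroll in this course?",
--         "What are the requirements to join?",
--         "How do I register for this course?"
--     ]
--
--     # Choose questions based on query context, but keep them general
--     if any(word in query_lower for word in ['price', 'cost', 'fee', 'payment', 'money']):
--         return logistics_questions
--     elif any(word in query_lower for word in ['schedule', 'timing', 'start', 'batch', 'duration', 'long']):
--         return completion_questions
--     elif any(word in query_lower for word in ['certificate', 'certification', 'outcome', 'completion', 'finish']):
--         return enrollment_questions
--     elif any(word in query_lower for word in ['enroll', 'join', 'register', 'apply', 'signup']):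
--         return basic_info_questions
--     elif any(word in query_lower for word in ['about', 'topic', 'curriculum', 'content', 'learn', 'cover']):
--         return logistics_questions
--     else:
--         return basic_info_questions
-- ===== SOURCE B (Python) =====
-- def _generate_suggested_questions(query, response_text=""):
--     """Inverted-index rewrite: a flat keyword->priority index; the answer is the
--     question list at the MINIMUM priority among matching keywords (5 = default)."""
--     query_lower = query.lower()
--
--     basic_info_questions = [
--         "What topics are covered in this course?",
--         "What will I learn from this course?",
--         "Tell me more about the course content"
--     ]
--     logistics_questions = [
--         "What are the course fees?",
--         "When does the course start?",
--         "How long is the course?"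
--     ]
--     completion_questions = [
--         "What do I get after completing the course?",
--         "Are there any certificates provided?",
--         "What are the course outcomes?"
--     ]
--     enrollment_questions = [
--         "How can I enroll in this course?",
--         "What are the requirements to join?",
--         "How do I register for this course?"
--     ]
--
--     groups = [
--         ['price', 'cost', 'fee', 'payment', 'money'],
--         ['schedule', 'timing', 'start', 'batch', 'duration', 'long'],
--         ['certificate', 'certification', 'outcome', 'completion', 'finish'],
--         ['enroll', 'join', 'register', 'apply', 'signup'],
--         ['about', 'topic', 'curriculum', 'content', 'learn', 'cover'],
--     ]
--     index = [(kw, i) for i, kws in enumerate(groups) for kw in kws]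
--     best = min((i for kw, i in index if kw in query_lower), default=5)
--     tables = [logistics_questions, completion_questions, enrollment_questions,
--               basic_info_questions, logistics_questions, basic_info_questions]
--     return tables[best]
-- ===== Notes on version B (the rewrite author's own statement) =====
-- stated objective: alternative
-- what changed: Replaces the if/elif chain by an inverted index: a flat keyword->priority list, take the minimum priority among keywords occurring in the query (default 5) and index a table of question lists with it.
import Mathlib
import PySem

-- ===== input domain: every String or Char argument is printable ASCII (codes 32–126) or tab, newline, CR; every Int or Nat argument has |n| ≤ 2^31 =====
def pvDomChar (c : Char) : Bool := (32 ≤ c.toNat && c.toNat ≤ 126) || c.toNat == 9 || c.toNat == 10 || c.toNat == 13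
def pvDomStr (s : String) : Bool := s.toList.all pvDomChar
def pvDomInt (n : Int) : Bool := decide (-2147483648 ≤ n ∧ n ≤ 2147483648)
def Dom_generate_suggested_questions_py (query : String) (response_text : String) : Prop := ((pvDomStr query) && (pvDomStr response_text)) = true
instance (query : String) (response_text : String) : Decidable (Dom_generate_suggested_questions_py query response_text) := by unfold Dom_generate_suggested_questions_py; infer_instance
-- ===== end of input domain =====

-- ===== PORT A =====
-- B changes: inverted keyword->priority index, answer = table[min matching priority] instead of A's if/elif chain (alternative, same cost).
def generate_suggested_questions_py (query : String) (_response_text : String) : List String :=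
  let query_lower := PySem.Str.lower query
  let basic_info_questions := ["What topics are covered in this course?",
    "What will I learn from this course?",
    "Tell me more about the course content"]
  let logistics_questions := ["What are the course fees?",
    "When does the course start?",
    "How long is the course?"]
  let completion_questions := ["What do I get after completing the course?",
    "Are there any certificates provided?",
    "What are the course outcomes?"]
  let enrollment_questions := ["How can I enroll in this course?",
    "What are the requirements to join?",
    "How do I register for this course?"]
  if (["price", "cost", "fee", "payment", "money"].any (fun w => PySem.Str.isIn w query_lower)) then
    logistics_questions
  else if (["schedule", "timing", "start", "batch", "duration", "long"].any (fun w => PySem.Str.isIn w query_lower)) then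
    completion_questions
  else if (["certificate", "certification", "outcome", "completion", "finish"].any (fun w => PySem.Str.isIn w query_lower)) then
    enrollment_questions
  else if (["enroll", "join", "register", "apply", "signup"].any (fun w => PySem.Str.isIn w query_lower)) then
    basic_info_questions
  else if (["about", "topic", "curriculum", "content", "learn", "cover"].any (fun w => PySem.Str.isIn w query_lower)) then
    logistics_questions
  else
    basic_info_questions

-- ===== PORT B =====
def generate_suggested_questions_py_alt (query : String) (_response_text : String) : List String :=
  let query_lower := PySem.Str.lower query
  let basic_info_questions := ["What topics are covered in this course?",
    "What will I learn from this course?",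
    "Tell me more about the course content"]
  let logistics_questions := ["What are the course fees?",
    "When does the course start?",
    "How long is the course?"]
  let completion_questions := ["What do I get after completing the course?",
    "Are there any certificates provided?",
    "What are the course outcomes?"]
  let enrollment_questions := ["How can I enroll in this course?",
    "What are the requirements to join?",
    "How do I register for this course?"]
  let groups : List (List String) :=
    [["price", "cost", "fee", "payment", "money"],
     ["schedule", "timing", "start", "batch", "duration", "long"],
     ["certificate", "certification", "outcome", "completion", "finish"],
     ["enroll", "join", "register", "apply", "signup"],
     ["about", "topic", "curriculum", "content", "learn", "cover"]]
  -- [(kw, i) for i, kws in enumerate(groups) for kw in kws]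
  let index : List (String × Int) :=
    (PySem.List.enumerate groups).flatMap (fun p => p.2.map (fun kw => (kw, p.1)))
  -- min((i for kw, i in index if kw in query_lower), default=5)
  let best : Int :=
    (PySem.List.min?
      (index.filterMap (fun p => if PySem.Str.isIn p.1 query_lower then some p.2 else none))
      (fun y => y)).getD 5
  let tables := [logistics_questions, completion_questions, enrollment_questions,
                 basic_info_questions, logistics_questions, basic_info_questions]
  -- tables[best]: best is always in 0..5, so Python's indexing never raises; getD [] is exact here
  (PySem.List.pyGet? tables best).getD []

-- ===== PRECONDITION & SPEC =====
def Spec_generate_suggested_questions_py (query : String) (response_text : String) (out : List String) : Prop := out = generate_suggested_questions_py_alt query response_text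
instance (query : String) (response_text : String) (out : List String) : Decidable (Spec_generate_suggested_questions_py query response_text out) := by unfold Spec_generate_suggested_questions_py; infer_instance

-- ===== CLAIM =====
def Claim_equal_generate_suggested_questions_py : Prop := ∀ (query : String) (response_text : String), Dom_generate_suggested_questions_py query response_text → Spec_generate_suggested_questions_py query response_text (generate_suggested_questions_py query response_text)

-- ===== LEMMAS AND PROOFS =====

-- a constant block of the inverted index filters to a constant list
theorem pv_filterMap_block (p : String → Bool) (ws : List String) (i : Int) (rest : List (String × Int)) :
    List.filterMap (fun q => if p q.1 then some q.2 else none) ((ws.map (fun kw => (kw, i))) ++ rest)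
      = (ws.filter p).map (fun _ => i) ++ List.filterMap (fun q => if p q.1 then some q.2 else none) rest := by
  induction ws with
  | nil => simp
  | cons w ws ih =>
    by_cases h : p w <;> simp [h, ih]

theorem pv_filterMap_block_nil (p : String → Bool) (ws : List String) (i : Int) :
    List.filterMap (fun q => if p q.1 then some q.2 else none) (ws.map (fun kw => (kw, i)))
      = (ws.filter p).map (fun _ => i) := by
  have h := pv_filterMap_block p ws i []
  simpa using h

-- running min over a constant block
theorem pv_foldl_min_block (p : String → Bool) (ws : List String) (i acc : Int) :
    List.foldl min acc ((ws.filter p).map (fun _ => i)) = if ws.any p then min acc i else acc := by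
  induction ws generalizing acc with
  | nil => simp
  | cons w ws ih =>
    by_cases h : p w
    · rw [List.filter_cons_of_pos h]
      simp only [List.map_cons, List.foldl_cons, ih, List.any_cons, h, Bool.true_or, if_true]
      by_cases hany : ws.any p = true <;> simp [hany]
    · rw [List.filter_cons_of_neg (by simpa using h), ih]
      simp [List.any_cons, h]

-- min(l, default=5) is the running-min fold from 5, when every element is ≤ 5
theorem pv_min_getD (l : List Int) (h : ∀ x ∈ l, x ≤ (5 : Int)) :
    (PySem.List.min? l (fun y => y)).getD 5 = l.foldl min 5 := by
  cases l with
  | nil => simp [PySem.List.min?]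
  | cons x t =>
    rw [PySem.List.min?_id_cons]
    simp only [Option.getD_some, List.foldl_cons]
    have hx : min 5 x = x := min_eq_right (h x (by simp))
    rw [hx]

-- ===== VERDICT =====
theorem generate_suggested_questions_py_spec : Claim_equal_generate_suggested_questions_py := by
  intro query response_text _
  unfold Spec_generate_suggested_questions_py generate_suggested_questions_py
    generate_suggested_questions_py_alt
  simp only [PySem.List.enumerate_cons, PySem.List.enumerate_nil, List.flatMap_cons,
    List.flatMap_nil, List.append_nil]
  set q := PySem.Str.lower query with hq
  set p : String → Bool := fun w => PySem.Str.isIn w q with hp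
  rw [show (0:Int)+1 = 1 by norm_num, show (1:Int)+1 = 2 by norm_num,
      show (2:Int)+1 = 3 by norm_num, show (3:Int)+1 = 4 by norm_num]
  rw [pv_filterMap_block p _ 0, pv_filterMap_block p _ 1, pv_filterMap_block p _ 2,
      pv_filterMap_block p _ 3, pv_filterMap_block_nil p _ 4]
  rw [pv_min_getD _ (by
    intro x hx
    simp only [List.mem_append, List.mem_map] at hx
    rcases hx with ((⟨_,_,h⟩|⟨_,_,h⟩)|⟨_,_,h⟩)|⟨_,_,h⟩|⟨_,_,h⟩ <;> omega)]
  simp only [List.foldl_append, pv_foldl_min_block]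
  by_cases h0 : (["price", "cost", "fee", "payment", "money"].any p) <;>
  by_cases h1 : (["schedule", "timing", "start", "batch", "duration", "long"].any p) <;>
  by_cases h2 : (["certificate", "certification", "outcome", "completion", "finish"].any p) <;>
  by_cases h3 : (["enroll", "join", "register", "apply", "signup"].any p) <;>
  by_cases h4 : (["about", "topic", "curriculum", "content", "learn", "cover"].any p) <;>
  simp [h0, h1, h2, h3, h4, PySem.List.pyGet?, PySem.List.pyIdx?]
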